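-- pv_equiv track=rewrite | github.com/tylermontell/magic_machine | preprocess_repopack.py | reorder_critical_sections
-- ===== SOURCE A (Python) =====
-- def reorder_critical_sections(lines):
--     """Reorder critical sections like summaries and config files at the top."""
--     critical_sections = []
--     remaining_lines = []
--     for line in lines:
--         if "<summary>" in line or "README" in line or "config.py" in line:
--             critical_sections.append(line)
--         else:
--             remaining_lines.append(line)
--     return critical_sections + remaining_lines
-- ===== SOURCE B (Python) =====
-- def reorder_critical_sections(lines):
--     """Reorder critical sections like summaries and config files at the top."""
--     return sorted(
--         lines,
--         key=lambda line: 0 if ("<summary>" in line or "README" in line or "config.py" in line) else 1,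
--     )
-- ===== Notes on version B (the rewrite author's own statement) =====
-- stated objective: simpler
-- what changed: Replaces the explicit two-bucket partition loop and concatenation with a single stable sort by a binary key (0 for critical lines, 1 otherwise); stability preserves relative order within each group, giving the identical output.
import Mathlib
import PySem

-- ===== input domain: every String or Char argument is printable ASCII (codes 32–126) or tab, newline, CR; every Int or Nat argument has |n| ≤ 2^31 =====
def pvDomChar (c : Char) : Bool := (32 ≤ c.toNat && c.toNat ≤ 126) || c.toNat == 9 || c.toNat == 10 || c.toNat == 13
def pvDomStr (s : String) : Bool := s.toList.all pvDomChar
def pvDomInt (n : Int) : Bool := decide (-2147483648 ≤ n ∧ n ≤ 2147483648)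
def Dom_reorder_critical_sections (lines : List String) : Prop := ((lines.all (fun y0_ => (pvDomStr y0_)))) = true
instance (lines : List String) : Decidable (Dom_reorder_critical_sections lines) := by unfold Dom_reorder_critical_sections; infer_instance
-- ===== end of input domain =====

-- B replaces A's two-bucket partition loop by one stable sort with a binary key (simpler, same output).

-- the shared criticality predicate: "<summary>" in line or "README" in line or "config.py" in line
def pvCrit (line : String) : Bool :=
  PySem.Str.isIn "<summary>" line || PySem.Str.isIn "README" line || PySem.Str.isIn "config.py" line

-- ===== PORT A =====
-- loop appending each line to critical_sections or remaining_lines, then concatenate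
def reorder_critical_sections (lines : List String) : List String :=
  let st := lines.foldl
    (fun (acc : List String × List String) line =>
      if pvCrit line then (acc.1 ++ [line], acc.2) else (acc.1, acc.2 ++ [line]))
    ([], [])
  st.1 ++ st.2

-- ===== PORT B =====
-- sorted(lines, key=lambda line: 0 if crit(line) else 1)  — Python's stable sort
def pvKey (line : String) : Int := if pvCrit line then 0 else 1

def reorder_critical_sections_alt (lines : List String) : List String :=
  PySem.List.sorted lines pvKey

-- ===== PRECONDITION & SPEC =====
def Spec_reorder_critical_sections (lines : List String) (out : List String) : Prop := out = reorder_critical_sections_alt lines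
instance (lines : List String) (out : List String) : Decidable (Spec_reorder_critical_sections lines out) := by unfold Spec_reorder_critical_sections; infer_instance

-- ===== CLAIM (what is proved, stated in full; the proofs are below) =====
def Claim_equal_reorder_critical_sections : Prop := ∀ (lines : List String), Dom_reorder_critical_sections lines → Spec_reorder_critical_sections lines (reorder_critical_sections lines)

-- ===== LEMMAS AND PROOFS =====

-- A's loop: the pair of buckets is (cs ++ critical lines of xs, rs ++ the rest)
theorem pvA_loop (xs cs rs : List String) :
    xs.foldl
      (fun (acc : List String × List String) line =>
        if pvCrit line then (acc.1 ++ [line], acc.2) else (acc.1, acc.2 ++ [line]))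
      (cs, rs)
    = (cs ++ xs.filter pvCrit, rs ++ xs.filter (fun l => !pvCrit l)) := by
  induction xs generalizing cs rs with
  | nil => simp
  | cons x xs ih =>
    by_cases hc : pvCrit x = true <;>
      simp [List.foldl_cons, hc, ih]

-- insertBy skips a prefix it never wants to go before
theorem pvInsertBy_append (before : String → String → Bool) (x : String) (cs rs : List String)
    (h : ∀ y ∈ cs, before x y = false) :
    PySem.List.insertBy before x (cs ++ rs) = cs ++ PySem.List.insertBy before x rs := by
  induction cs with
  | nil => simp
  | cons c cs ih =>
    have hc : before x c = false := h c (by simp)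
    simp [PySem.List.insertBy, hc, ih (fun y hy => h y (by simp [hy]))]

-- inserting a critical line in front of an all-non-critical list puts it at the head
theorem pvInsertBy_head (x : String) (rs : List String)
    (hx : pvCrit x = true) (h : ∀ y ∈ rs, pvCrit y = false) :
    PySem.List.insertBy (fun a b => decide (pvKey a < pvKey b)) x rs = x :: rs := by
  cases rs with
  | nil => simp [PySem.List.insertBy]
  | cons r rs =>
    have hr : pvCrit r = false := h r (by simp)
    simp [PySem.List.insertBy, pvKey, hx, hr]

-- B's stable insertion-sort loop keeps the two groups contiguous and in order
theorem pvB_loop (xs cs rs : List String)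
    (hcs : ∀ y ∈ cs, pvCrit y = true) (hrs : ∀ y ∈ rs, pvCrit y = false) :
    xs.foldl
      (fun acc x => PySem.List.insertBy (fun a b => decide (pvKey a < pvKey b)) x acc)
      (cs ++ rs)
    = (cs ++ xs.filter pvCrit) ++ (rs ++ xs.filter (fun l => !pvCrit l)) := by
  induction xs generalizing cs rs with
  | nil => simp
  | cons x xs ih =>
    by_cases hc : pvCrit x = true
    · have h1 : PySem.List.insertBy (fun a b => decide (pvKey a < pvKey b)) x (cs ++ rs)
          = (cs ++ [x]) ++ rs := by
        rw [pvInsertBy_append _ _ _ _ (fun y hy => by simp [pvKey, hc, hcs y hy]),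
            pvInsertBy_head x rs hc hrs]
        simp
      have hcs' : ∀ y ∈ cs ++ [x], pvCrit y = true := by
        intro y hy
        rcases List.mem_append.mp hy with h | h
        · exact hcs y h
        · simp at h; subst h; exact hc
      have ih' := ih (cs ++ [x]) rs hcs' hrs
      rw [List.foldl_cons, h1]
      simp only [List.filter_cons, hc]
      simpa using ih'
    · have hc' : pvCrit x = false := by simpa using hc
      have h1 : PySem.List.insertBy (fun a b => decide (pvKey a < pvKey b)) x (cs ++ rs)
          = cs ++ (rs ++ [x]) := by
        rw [PySem.List.insertBy_of_forall_not_before]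
        · simp
        · intro y hy
          rcases List.mem_append.mp hy with h | h
          · simp [pvKey, hc', hcs y h]
          · simp [pvKey, hc', hrs y h]
      have hrs' : ∀ y ∈ rs ++ [x], pvCrit y = false := by
        intro y hy
        rcases List.mem_append.mp hy with h | h
        · exact hrs y h
        · simp at h; subst h; exact hc'
      have ih' := ih cs (rs ++ [x]) hcs hrs'
      rw [List.foldl_cons, h1]
      simp only [List.filter_cons, hc']
      simpa using ih'

-- ===== VERDICT (by name: the statement is the Claim_ definition above) =====
theorem reorder_critical_sections_spec : Claim_equal_reorder_critical_sections := by
  intro lines _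
  unfold Spec_reorder_critical_sections reorder_critical_sections reorder_critical_sections_alt
  rw [PySem.List.sorted_eq_foldl_insertBy]
  have hb := pvB_loop lines [] [] (by simp) (by simp)
  simp only [List.nil_append] at hb
  rw [hb, pvA_loop]
  simp
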